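-- pv_equiv track=rewrite | github.com/DianaBarrios/PatitoMasMas | compiler.py | getTypeOfAddr
-- ===== SOURCE A (Python) =====
-- def getTypeOfAddr(addr):
--     """Función que te da el tipo de una variable(dirección) con base a sus rangos
--
--     Arguments:
--         addr {int} -- Dirección de la variable
--
--     Returns:
--         string -- El tipo de la variable
--     """
--     if addr >= 50000:
--         return 'int'
--     while(addr > 14999):
--         addr = addr - 10000
--     if addr >= 5000 and addr < 8000:
--         return 'int'
--     elif addr >= 8000 and addr < 10000:
--         return 'float'
--     elif addr >= 10000 and addr < 13000:
--         return 'char'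
--     elif addr >= 13000 and addr < 14000:
--         return 'string'
--     elif addr >= 14000 and addr < 15000:
--         return 'bool'
-- ===== SOURCE B (Python) =====
-- _TYPE_BY_KILO = {5: 'int', 6: 'int', 7: 'int', 8: 'float', 9: 'float',
--                  10: 'char', 11: 'char', 12: 'char', 13: 'string', 14: 'bool'}
--
--
-- def getTypeOfAddr(addr):
--     if addr >= 50000:
--         return 'int'
--     if addr > 14999:
--         addr = 5000 + (addr - 5000) % 10000
--     return _TYPE_BY_KILO.get(addr // 1000)
-- ===== Notes on version B (the rewrite author's own statement) =====
-- stated objective: simpler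
-- what changed: Replaces the subtract-10000 while loop with a closed-form floor-mod expression and the five-branch if/elif range chain with a single dict lookup keyed by addr // 1000.
import Mathlib
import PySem

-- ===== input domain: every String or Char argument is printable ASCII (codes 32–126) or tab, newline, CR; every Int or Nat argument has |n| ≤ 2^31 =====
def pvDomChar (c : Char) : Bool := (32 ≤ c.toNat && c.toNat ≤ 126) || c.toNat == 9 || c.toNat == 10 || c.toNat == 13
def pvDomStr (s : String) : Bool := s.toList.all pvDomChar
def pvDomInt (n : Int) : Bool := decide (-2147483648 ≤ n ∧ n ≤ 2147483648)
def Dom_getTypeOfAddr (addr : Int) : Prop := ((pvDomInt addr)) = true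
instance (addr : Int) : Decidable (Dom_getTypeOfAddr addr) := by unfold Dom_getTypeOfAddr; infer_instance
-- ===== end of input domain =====

-- B replaces A's subtract-10000 while loop by a closed-form floor-mod fold and the
-- if/elif range chain by a single dict lookup on addr // 1000 (objective: simpler).

-- ===== PORT A =====
-- A's while loop: subtract 10000 while addr > 14999
def pvReduceA (addr : Int) : Int :=
  if 14999 < addr then pvReduceA (addr - 10000) else addr
termination_by (addr - 14999).toNat
decreasing_by omega

-- A's if/elif chain after the loop (falls through to None)
def pvClassifyA (addr : Int) : Option String :=
  if 5000 ≤ addr ∧ addr < 8000 then some "int"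
  else if 8000 ≤ addr ∧ addr < 10000 then some "float"
  else if 10000 ≤ addr ∧ addr < 13000 then some "char"
  else if 13000 ≤ addr ∧ addr < 14000 then some "string"
  else if 14000 ≤ addr ∧ addr < 15000 then some "bool"
  else none

def getTypeOfAddr (addr : Int) : Option String :=
  if 50000 ≤ addr then some "int"
  else pvClassifyA (pvReduceA addr)

-- ===== PORT B =====
def pvTypeByKilo : PySem.Dict Int String :=
  PySem.Dict.ofList [(5, "int"), (6, "int"), (7, "int"), (8, "float"), (9, "float"),
                     (10, "char"), (11, "char"), (12, "char"), (13, "string"), (14, "bool")]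

def getTypeOfAddr_alt (addr : Int) : Option String :=
  if 50000 ≤ addr then some "int"
  else
    let a := if 14999 < addr then 5000 + PySem.Int.mod (addr - 5000) 10000 else addr
    pvTypeByKilo.get? (PySem.Int.floordiv a 1000)

-- ===== PRECONDITION & SPEC =====
def Spec_getTypeOfAddr (addr : Int) (out : Option String) : Prop := out = getTypeOfAddr_alt addr
instance (addr : Int) (out : Option String) : Decidable (Spec_getTypeOfAddr addr out) := by unfold Spec_getTypeOfAddr; infer_instance

-- ===== CLAIM (what is proved, stated in full; the proofs are below) =====
def Claim_equal_getTypeOfAddr : Prop := ∀ (addr : Int), Dom_getTypeOfAddr addr → Spec_getTypeOfAddr addr (getTypeOfAddr addr)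

-- ===== LEMMAS AND PROOFS =====

-- the while loop computes the floor-mod representative in (4999, 14999]
theorem pvReduceA_eq (addr : Int) (h : 14999 < addr) :
    pvReduceA addr = 5000 + PySem.Int.mod (addr - 5000) 10000 := by
  rw [pvReduceA, if_pos h]
  by_cases h2 : 14999 < addr - 10000
  · rw [pvReduceA_eq (addr - 10000) h2]
    simp only [PySem.Int.mod_eq_emod_of_pos (show (0:Int) < 10000 by norm_num)]
    omega
  · rw [pvReduceA, if_neg h2]
    simp only [PySem.Int.mod_eq_emod_of_pos (show (0:Int) < 10000 by norm_num)]
    omega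
termination_by (addr - 14999).toNat
decreasing_by omega

-- the if/elif range chain agrees with the dict lookup on addr // 1000 (for addr ≤ 14999)
theorem pvClassify_eq (a : Int) (h : a ≤ 14999) :
    pvClassifyA a = pvTypeByKilo.get? (PySem.Int.floordiv a 1000) := by
  rw [PySem.Int.floordiv_eq_ediv_of_pos (by norm_num)]
  have hmk : pvTypeByKilo = PySem.Dict.mk
      [(5, "int"), (6, "int"), (7, "int"), (8, "float"), (9, "float"),
       (10, "char"), (11, "char"), (12, "char"), (13, "string"), (14, "bool")] := rfl
  rw [hmk]
  unfold pvClassifyA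
  split_ifs with h1 h2 h3 h4 h5
  · have hq : a / 1000 = 5 ∨ a / 1000 = 6 ∨ a / 1000 = 7 := by omega
    rcases hq with h|h|h <;> rw [h] <;> rfl
  · have hq : a / 1000 = 8 ∨ a / 1000 = 9 := by omega
    rcases hq with h|h <;> rw [h] <;> rfl
  · have hq : a / 1000 = 10 ∨ a / 1000 = 11 ∨ a / 1000 = 12 := by omega
    rcases hq with h|h|h <;> rw [h] <;> rfl
  · have hq : a / 1000 = 13 := by omega
    rw [hq]; rfl
  · have hq : a / 1000 = 14 := by omega
    rw [hq]; rfl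
  · have hq : a / 1000 ≤ 4 := by omega
    simp only [PySem.Dict.get?_mk_cons, beq_iff_eq]
    rw [if_neg (by omega), if_neg (by omega), if_neg (by omega), if_neg (by omega),
      if_neg (by omega), if_neg (by omega), if_neg (by omega), if_neg (by omega),
      if_neg (by omega), if_neg (by omega)]
    simp [PySem.Dict.get?]

theorem getTypeOfAddr_eq (addr : Int) : getTypeOfAddr addr = getTypeOfAddr_alt addr := by
  unfold getTypeOfAddr getTypeOfAddr_alt
  by_cases h50 : 50000 ≤ addr
  · simp [h50]
  · rw [if_neg h50, if_neg h50]
    by_cases h15 : 14999 < addr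
    · rw [pvReduceA_eq addr h15, pvClassify_eq _ (by
        have := PySem.Int.mod_lt (addr - 5000) (b := 10000) (by norm_num)
        omega)]
      simp [h15]
    · rw [pvReduceA, if_neg h15, pvClassify_eq _ (by omega)]
      simp [h15]

-- ===== VERDICT (by name: the statement is the Claim_ definition above) =====
theorem getTypeOfAddr_spec : Claim_equal_getTypeOfAddr := by
  intro addr _
  unfold Spec_getTypeOfAddr
  exact getTypeOfAddr_eq addr
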